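-- pv_equiv track=rewrite | github.com/pypi-data/pypi-mirror-366 | packages/koder/koder-0.2.0.tar.gz/koder-0.2.0/koder_agent/core/scheduler.py | _get_display_input
-- ===== SOURCE A (Python) =====
-- def _get_display_input(user_input: str) -> str:
--     """Get a filtered version of user input for display purposes."""
--     # Check if input contains KODER.md content
--     if "KODER.md content:" in user_input:
--         lines = user_input.split("\n")
--         filtered_lines = []
--         skip_koder_content = False
--
--         for line in lines:
--             if "KODER.md content:" in line:
--                 skip_koder_content = True
--                 continue
--             elif skip_koder_content and line.startswith("User request:"):
--                 skip_koder_content = False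
--                 filtered_lines.append(line)
--             elif not skip_koder_content:
--                 filtered_lines.append(line)
--
--         return "\n".join(filtered_lines)
--
--     return user_input
-- ===== SOURCE B (Python) =====
-- def _skipped_at(lines, i):
--     """Whether line i lies inside a KODER.md content block: look backward for
--     the most recent control line before i."""
--     for prev in reversed(lines[:i]):
--         if "KODER.md content:" in prev:
--             return True
--         if prev.startswith("User request:"):
--             return False
--     return False
--
--
-- def _get_display_input(user_input: str) -> str:
--     """Get a filtered version of user input for display purposes."""
--     if "KODER.md content:" not in user_input:
--         return user_input
--     lines = user_input.split("\n")
--     kept = []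
--     for i, line in enumerate(lines):
--         if "KODER.md content:" in line:
--             continue
--         if line.startswith("User request:") or not _skipped_at(lines, i):
--             kept.append(line)
--     return "\n".join(kept)
-- ===== Notes on version B (the rewrite author's own statement) =====
-- stated objective: alternative
-- what changed: B drops A's forward skip-flag state machine entirely: each non-marker line is kept or dropped by a stateless backward scan from that line for the most recent control line (marker vs 'User request:' header), with header lines always kept.
import Mathlib
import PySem

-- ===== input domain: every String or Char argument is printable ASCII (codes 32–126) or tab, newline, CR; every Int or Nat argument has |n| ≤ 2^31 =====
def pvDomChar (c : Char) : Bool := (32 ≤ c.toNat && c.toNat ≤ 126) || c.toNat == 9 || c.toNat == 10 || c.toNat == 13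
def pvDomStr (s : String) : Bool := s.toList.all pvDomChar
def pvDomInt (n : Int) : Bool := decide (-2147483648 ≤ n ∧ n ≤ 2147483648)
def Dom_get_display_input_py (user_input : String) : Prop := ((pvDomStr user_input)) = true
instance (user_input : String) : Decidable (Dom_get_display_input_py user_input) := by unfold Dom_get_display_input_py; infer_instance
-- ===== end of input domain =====

-- B replaces A's forward skip-flag state machine by a stateless per-line backward scan
-- for the most recent control line (alternative algorithm; B is quadratic worst case).

-- ===== PORT A =====
def get_display_input_py (user_input : String) : String :=
  if PySem.Str.isIn "KODER.md content:" user_input then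
    let lines := (PySem.Str.split? user_input "\n").getD []
    let r := lines.foldl (fun (st : Bool × List String) line =>
      if PySem.Str.isIn "KODER.md content:" line then (true, st.2)
      else if st.1 && PySem.Str.startswith line "User request:" then (false, st.2 ++ [line])
      else if !st.1 then (st.1, st.2 ++ [line])
      else st) (false, ([] : List String))
    PySem.Str.join "\n" r.2
  else user_input

-- ===== PORT B =====
-- the backward for-loop of Source B's _skipped_at, over the already-reversed prefix
def scanBack : List String → Bool
  | [] => false
  | p :: rest =>
    if PySem.Str.isIn "KODER.md content:" p then true
    else if PySem.Str.startswith p "User request:" then false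
    else scanBack rest

-- _skipped_at(lines, i): reversed(lines[:i]) scanned for the nearest control line
def skippedAt (lines : List String) (i : Int) : Bool :=
  scanBack ((PySem.List.slice lines none (some i)).reverse)

def get_display_input_py_alt (user_input : String) : String :=
  if !(PySem.Str.isIn "KODER.md content:" user_input) then user_input
  else
    let lines := (PySem.Str.split? user_input "\n").getD []
    let kept := (PySem.List.enumerate lines).foldl (fun acc (p : Int × String) =>
      if PySem.Str.isIn "KODER.md content:" p.2 then acc
      else if PySem.Str.startswith p.2 "User request:" || !(skippedAt lines p.1) then acc ++ [p.2]
      else acc) []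
    PySem.Str.join "\n" kept

-- ===== PRECONDITION & SPEC =====
def Spec_get_display_input_py (user_input : String) (out : String) : Prop := out = get_display_input_py_alt user_input
instance (user_input : String) (out : String) : Decidable (Spec_get_display_input_py user_input out) := by unfold Spec_get_display_input_py; infer_instance

-- ===== CLAIM =====
def Claim_equal_get_display_input_py : Prop := ∀ (user_input : String), Dom_get_display_input_py user_input → Spec_get_display_input_py user_input (get_display_input_py user_input)

-- ===== LEMMAS AND PROOFS =====
def aStep : Bool × List String → String → Bool × List String := fun st line =>
  if PySem.Str.isIn "KODER.md content:" line then (true, st.2)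
  else if st.1 && PySem.Str.startswith line "User request:" then (false, st.2 ++ [line])
  else if !st.1 then (st.1, st.2 ++ [line])
  else st

def bStep (lines : List String) : List String → Int × String → List String := fun acc p =>
  if PySem.Str.isIn "KODER.md content:" p.2 then acc
  else if PySem.Str.startswith p.2 "User request:" || !(skippedAt lines p.1) then acc ++ [p.2]
  else acc

theorem skippedAt_take (lines pre rest : List String) (h : lines = pre ++ rest) :
    skippedAt lines (pre.length : Int) = scanBack pre.reverse := by
  unfold skippedAt
  rw [PySem.List.slice_to_natCast, h, List.take_left]

theorem main_inv (rest : List String) : ∀ (pre acc : List String) (lines : List String),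
    lines = pre ++ rest →
    (rest.foldl aStep (scanBack pre.reverse, acc)).2 =
      (PySem.List.enumerate rest (pre.length : Int)).foldl (bStep lines) acc := by
  induction rest with
  | nil => intro pre acc lines _; simp [PySem.List.enumerate_nil]
  | cons l rest' ih =>
    intro pre acc lines h
    have hpre' : lines = (pre ++ [l]) ++ rest' := by simp [h]
    have hlen : ((pre ++ [l]).length : Int) = (pre.length : Int) + 1 := by
      simp
    have hskip := skippedAt_take lines pre (l :: rest') h
    have hrec := ih (pre ++ [l]) (bStep lines acc ((pre.length : Int), l)) lines hpre'
    rw [hlen] at hrec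
    rw [PySem.List.enumerate_cons, List.foldl_cons, List.foldl_cons, ← hrec]
    congr 1
    cases hm : PySem.Str.isIn "KODER.md content:" l
    all_goals cases hu : PySem.Str.startswith l "User request:"
    all_goals cases hsb : scanBack pre.reverse
    all_goals simp only [aStep, bStep, List.reverse_append, List.reverse_cons,
      List.reverse_nil, List.nil_append, List.singleton_append, scanBack,
      hskip, hm, hu, hsb]
    all_goals simp

-- ===== VERDICT =====
theorem get_display_input_py_spec : Claim_equal_get_display_input_py := by
  intro user_input _
  unfold Spec_get_display_input_py get_display_input_py get_display_input_py_alt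
  cases h : PySem.Str.isIn "KODER.md content:" user_input
  · simp
  · simp only [Bool.not_true, Bool.false_eq_true, if_false, if_true]
    have := main_inv ((PySem.Str.split? user_input "\n").getD []) [] []
      ((PySem.Str.split? user_input "\n").getD []) (by simp)
    simp only [List.reverse_nil, scanBack, List.length_nil, Nat.cast_zero] at this
    exact congrArg (PySem.Str.join "\n") this
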